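-- pv_equiv track=rewrite | github.com/MER-GROUP/COURSES | ARCHIVE/Python. Поколение Python - контесты по программированию/Contest-001/Модуль 2/practice_3_v3.py | __algo2
-- ===== SOURCE A (Python) =====
-- def __algo2(s1, s2):
-- 	dict1, dict2 = {}, {}
-- 	for char in s1:
-- 		dict1[char] = dict1.get(char, 0) + 1
-- 	for char in s2:
-- 		dict2[char] = dict2.get(char, 0) + 1
-- 	for char in dict2:
-- 		if char not in dict1 or dict1[char] != dict2[char]:
-- 			return char
-- ===== SOURCE B (Python) =====
-- def __algo2(s1, s2):
--     a, b = sorted(s1), sorted(s2)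
--     bad = set()
--     i = j = 0
--     while i < len(a) or j < len(b):
--         if j == len(b) or (i < len(a) and a[i] < b[j]):
--             bad.add(a[i]); i += 1
--         elif i == len(a) or b[j] < a[i]:
--             bad.add(b[j]); j += 1
--         else:
--             i += 1; j += 1
--     for ch in s2:
--         if ch in bad:
--             return ch
-- ===== Notes on version B (the rewrite author's own statement) =====
-- stated objective: alternative
-- what changed: Replaces A's two frequency dictionaries by sorting both strings and running one merge pass over the sorted lists that collects every character with unmatched occurrences into a set, then scans s2 positionally for the first member of that set (first position equals dict2's first-key order since matching chars are never in the set).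
import Mathlib
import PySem

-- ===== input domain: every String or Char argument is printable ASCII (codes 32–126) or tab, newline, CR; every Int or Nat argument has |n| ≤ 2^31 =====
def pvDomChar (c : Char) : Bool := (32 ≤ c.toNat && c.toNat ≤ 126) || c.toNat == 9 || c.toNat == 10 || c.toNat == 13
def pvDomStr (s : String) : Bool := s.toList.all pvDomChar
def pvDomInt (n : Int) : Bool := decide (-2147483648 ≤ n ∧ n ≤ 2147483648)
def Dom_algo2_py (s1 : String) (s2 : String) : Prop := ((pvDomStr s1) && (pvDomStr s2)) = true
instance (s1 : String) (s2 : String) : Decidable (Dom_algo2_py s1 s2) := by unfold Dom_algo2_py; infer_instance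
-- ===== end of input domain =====

-- B replaces A's two frequency dictionaries by sort-both + one sorted-merge pass that collects the
-- mismatched characters into a set, then scans s2 for the first member; same result, alternative algorithm.

-- ===== PORT A =====
def algo2_py (s1 : String) (s2 : String) : Option String :=
  let dict1 := s1.toList.foldl (fun d c => d.insert c (d.getD c 0 + 1)) (PySem.Dict.empty : PySem.Dict Char Int)
  let dict2 := s2.toList.foldl (fun d c => d.insert c (d.getD c 0 + 1)) (PySem.Dict.empty : PySem.Dict Char Int)
  (dict2.keys.find? (fun c => !dict1.contains c || dict1.getD c 0 != dict2.getD c 0)).map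
    (fun c => String.ofList [c])

-- ===== PORT B =====
-- the while-loop of Source B: merge the two sorted lists, adding every unmatched occurrence to the set
def badLoop : List Char → List Char → PySem.Set Char → PySem.Set Char
  | [], [], s => s
  | x :: a, [], s => badLoop a [] (PySem.Set.add s x)
  | [], y :: b, s => badLoop [] b (PySem.Set.add s y)
  | x :: a, y :: b, s =>
      if x < y then badLoop a (y :: b) (PySem.Set.add s x)
      else if y < x then badLoop (x :: a) b (PySem.Set.add s y)
      else badLoop a b s

def algo2_py_alt (s1 : String) (s2 : String) : Option String :=
  let a := PySem.List.sorted s1.toList (fun c => c) false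
  let b := PySem.List.sorted s2.toList (fun c => c) false
  let bad := badLoop a b PySem.Set.empty
  (s2.toList.find? (fun ch => PySem.Set.contains bad ch)).map (fun ch => String.ofList [ch])

-- ===== PRECONDITION & SPEC =====
def Spec_algo2_py (s1 : String) (s2 : String) (out : Option String) : Prop := out = algo2_py_alt s1 s2
instance (s1 : String) (s2 : String) (out : Option String) : Decidable (Spec_algo2_py s1 s2 out) := by unfold Spec_algo2_py; infer_instance

-- ===== CLAIM (what is proved, stated in full; the proofs are below) =====
def Claim_equal_algo2_py : Prop := ∀ (s1 : String) (s2 : String), Dom_algo2_py s1 s2 → Spec_algo2_py s1 s2 (algo2_py s1 s2)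

-- ===== LEMMAS AND PROOFS =====

-- membership in the merge-collected set: exactly the chars with differing counts (plus the accumulator)
theorem mem_badLoop (c : Char) :
    ∀ (a b : List Char) (s : PySem.Set Char), a.Pairwise (· ≤ ·) → b.Pairwise (· ≤ ·) →
      (c ∈ badLoop a b s ↔ c ∈ s ∨ a.count c ≠ b.count c) := by
  intro a b s ha hb
  induction a, b, s using badLoop.induct with
  | case1 s =>
    simp [badLoop]
  | case2 x a s ih =>
    rw [badLoop, ih ha.of_cons hb, PySem.Set.mem_add]
    by_cases hcx : c = x
    · simp [hcx]
    · simp [hcx, Ne.symm hcx]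
  | case3 y b s ih =>
    rw [badLoop, ih ha hb.of_cons, PySem.Set.mem_add]
    by_cases hcy : c = y
    · simp [hcy]
    · simp [hcy, Ne.symm hcy]
  | case4 x a y b s h ih =>
    rw [badLoop, if_pos h, ih ha.of_cons hb, PySem.Set.mem_add]
    by_cases hcx : c = x
    · subst hcx
      have hnot : c ∉ y :: b := by
        intro hmem
        have hy : ∀ z ∈ y :: b, y ≤ z := by
          intro z hz
          rcases List.mem_cons.mp hz with rfl | hz
          · exact le_refl _
          · exact (List.pairwise_cons.mp hb).1 z hz
        exact absurd (hy c hmem) (not_le.mpr h)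
      have h0 : List.count c (y :: b) = 0 := List.count_eq_zero.mpr hnot
      simp [h0]
    · simp [hcx, List.count_cons, Ne.symm hcx]
  | case5 x a y b s h1 h2 ih =>
    rw [badLoop, if_neg h1, if_pos h2, ih ha hb.of_cons, PySem.Set.mem_add]
    by_cases hcy : c = y
    · subst hcy
      have hnot : c ∉ x :: a := by
        intro hmem
        have hx : ∀ z ∈ x :: a, x ≤ z := by
          intro z hz
          rcases List.mem_cons.mp hz with rfl | hz
          · exact le_refl _
          · exact (List.pairwise_cons.mp ha).1 z hz
        exact absurd (hx c hmem) (not_le.mpr h2)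
      have h0 : List.count c (x :: a) = 0 := List.count_eq_zero.mpr hnot
      simp [h0]
    · simp [hcy, List.count_cons, Ne.symm hcy]
  | case6 x a y b s h1 h2 ih =>
    have hxy : x = y := le_antisymm (not_lt.mp h2) (not_lt.mp h1)
    subst hxy
    rw [badLoop, if_neg h1, if_neg h2, ih ha.of_cons hb.of_cons]
    by_cases hcx : c = x
    · simp [hcx]
    · simp [Ne.symm hcx]

theorem find?_foldl_setAdd {α : Type} [BEq α] [LawfulBEq α] (p : α → Bool) :
    ∀ (xs s : List α), (xs.foldl PySem.Set.add s).find? p = (s.find? p).or (xs.find? p) := by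
  intro xs
  induction xs with
  | nil => intro s; simp
  | cons x xs ih =>
    intro s
    simp only [List.foldl_cons, ih, List.find?_cons]
    by_cases hx : x ∈ s
    · have hadd : PySem.Set.add s x = s := by
        simp [PySem.Set.add, PySem.Set.contains, hx]
      rw [hadd]
      by_cases hp : p x
      · cases hy : s.find? p with
        | none => exact absurd hp (List.find?_eq_none.mp hy x hx)
        | some y => simp [Option.or]
      · simp [hp]
    · have hadd : PySem.Set.add s x = s ++ [x] := by
        simp [PySem.Set.add, PySem.Set.contains, hx]
      rw [hadd, List.find?_append]
      by_cases hp : p x <;> simp [hp]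

theorem find?_congr_mem {α : Type} (p q : α → Bool) :
    ∀ (l : List α), (∀ x ∈ l, p x = q x) → l.find? p = l.find? q := by
  intro l
  induction l with
  | nil => intro _; rfl
  | cons x xs ih =>
    intro h
    simp only [List.find?_cons, h x (List.mem_cons_self ..)]
    cases hq : q x
    · simp [ih (fun y hy => h y (List.mem_cons_of_mem _ hy))]
    · rfl

-- ===== VERDICT (by name: the statement is the Claim_ definition above) =====
theorem algo2_py_spec : Claim_equal_algo2_py := by
  intro s1 s2 _
  unfold Spec_algo2_py algo2_py algo2_py_alt
  simp only [PySem.Dict.foldl_insert_getD_add_one_eq_counter, PySem.Dict.keys_counter]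
  have hbad : ∀ c : Char,
      (c ∈ badLoop (PySem.List.sorted s1.toList (fun c => c) false)
          (PySem.List.sorted s2.toList (fun c => c) false) PySem.Set.empty
        ↔ List.count c s1.toList ≠ List.count c s2.toList) := by
    intro c
    rw [mem_badLoop c _ _ _
      (by simpa using PySem.List.sorted_pairwise s1.toList (fun c => c))
      (by simpa using PySem.List.sorted_pairwise s2.toList (fun c => c))]
    rw [(PySem.List.sorted_perm s1.toList (fun c => c) false).count_eq,
        (PySem.List.sorted_perm s2.toList (fun c => c) false).count_eq]
    simp [PySem.Set.empty]
  rw [show PySem.Set.ofList s2.toList = s2.toList.foldl PySem.Set.add [] from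
    PySem.Set.ofList_eq_foldl s2.toList]
  rw [find?_foldl_setAdd]
  simp only [List.find?_nil, Option.or]
  congr 1
  apply find?_congr_mem
  intro c hc
  have hB : PySem.Set.contains
      (badLoop (PySem.List.sorted s1.toList (fun c => c) false)
        (PySem.List.sorted s2.toList (fun c => c) false) PySem.Set.empty) c
      = decide (List.count c s1.toList ≠ List.count c s2.toList) := by
    have hbad' := hbad c
    rw [show (PySem.Set.empty : PySem.Set Char) = [] from rfl] at hbad'
    simp [PySem.Set.contains, hbad']
  rw [hB]
  simp only [PySem.Dict.contains_counter, PySem.Dict.getD_counter]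
  by_cases h1 : c ∈ s1.toList
  · by_cases he : List.count c s1.toList = List.count c s2.toList
    · simp [h1, he]
    · have he' : (List.count c s1.toList : Int) ≠ (List.count c s2.toList : Int) := by
        exact_mod_cast he
      have t1 : ((List.count c s1.toList : Int) != (List.count c s2.toList : Int)) = true := by
        simpa [bne_iff_ne] using he'
      simp [h1, t1, he]
  · have h1c : s1.toList.count c = 0 := List.count_eq_zero.mpr h1
    have h2c : s2.toList.count c ≠ 0 := by
      simpa [List.count_eq_zero] using hc
    simp [h1, h1c]
    omega
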